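-- pv_equiv track=rewrite | github.com/sinopolimonopoly/yt-shorts-analysis | phrase_checker.py | check_for_phrase
-- ===== SOURCE A (Python) =====
-- def check_for_phrase(phrase, transcript):
--
--     phrase_present = False
--     current_phrase = []
--     current_idx = 0
--
--     phrase_counter = 0
--
--     for word in transcript:
--         if word.lower() == phrase[current_idx]:
--             phrase_present = True
--             current_phrase.append(word.lower())
--             current_idx += 1
--
--             if current_phrase == phrase:
--                 phrase_counter += 1
--
--                 phrase_present = False
--                 current_phrase = []
--                 current_idx = 0
--
--
--         else:
--             phrase_present = False
--             current_phrase = []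
--             current_idx = 0
--
--
--     return phrase_counter
-- ===== SOURCE B (Python) =====
-- def check_for_phrase(phrase, transcript):
--     words = [w.lower() for w in transcript]
--
--     def match_len(p, ws):
--         k = 0
--         for a, b in zip(p, ws):
--             if b == a:
--                 k += 1
--             else:
--                 break
--         return k
--
--     count = 0
--     while words:
--         j = match_len(phrase, words)
--         if j == len(phrase):
--             count += 1
--             words = words[j:]
--         else:
--             words = words[j + 1:]
--     return count
-- ===== Notes on version B (the rewrite author's own statement) =====
-- stated objective: alternative
-- what changed: B lowercases the transcript in one staged pass and then scans by attempts: it computes the matched prefix length against the phrase and jumps past the whole attempt (j or j+1 words) via slicing, instead of A's per-word state machine that grows a current_phrase buffer and compares it to the full phrase at every word.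
import Mathlib
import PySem

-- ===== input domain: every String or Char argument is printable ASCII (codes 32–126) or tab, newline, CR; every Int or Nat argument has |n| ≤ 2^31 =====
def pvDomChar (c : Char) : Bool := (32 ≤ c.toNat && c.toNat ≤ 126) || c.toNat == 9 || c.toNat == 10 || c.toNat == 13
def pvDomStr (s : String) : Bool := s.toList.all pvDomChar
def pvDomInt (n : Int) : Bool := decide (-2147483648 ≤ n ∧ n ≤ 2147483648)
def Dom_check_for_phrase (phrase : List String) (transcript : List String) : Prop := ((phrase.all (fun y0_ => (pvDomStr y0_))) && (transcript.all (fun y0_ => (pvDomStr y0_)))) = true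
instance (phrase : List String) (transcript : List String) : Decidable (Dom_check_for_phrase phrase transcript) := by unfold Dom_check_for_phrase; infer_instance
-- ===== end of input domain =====

-- B replaces A's per-word state machine (growing current_phrase buffer compared against the
-- whole phrase each word) by a staged lowercase pass followed by a jump scan over match
-- attempts (alternative decomposition); return value only.

-- ===== PORT A =====
-- state: (phrase_present, current_phrase, current_idx, phrase_counter); one step per word,
-- phrase[current_idx] via pyGet? (none = IndexError, reachable only for phrase = []).
def goA (phrase : List String) : List String → Bool × List String × Int × Int → Int
  | [], st => st.2.2.2
  | word :: rest, (_, cp, ci, pc) =>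
    match PySem.List.pyGet? phrase ci with
    | some p =>
      if PySem.Str.lower word = p then
        let cp' := cp ++ [PySem.Str.lower word]
        let ci' := ci + 1
        if cp' = phrase then goA phrase rest (false, [], 0, pc + 1)
        else goA phrase rest (true, cp', ci', pc)
      else goA phrase rest (false, [], 0, pc)
    | none => goA phrase rest (false, [], 0, pc)

def check_for_phrase (phrase : List String) (transcript : List String) : Int :=
  goA phrase transcript (false, [], 0, 0)

-- ===== PORT B =====
-- inner helper match_len: length of the common prefix of the phrase and the word list.
def matchLen : List String → List String → Nat
  | p :: ps, w :: ws => if w = p then matchLen ps ws + 1 else 0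
  | _, _ => 0

-- the while loop over the (already lowercased) word list; fuel = initial length is only a
-- totality guard: inside Pre_ (phrase ≠ []) every iteration drops ≥ 1 word.
def goB (phrase : List String) : Nat → List String → Int → Int
  | _, [], count => count
  | 0, _ :: _, count => count
  | fuel + 1, w :: ws, count =>
    let j := matchLen phrase (w :: ws)
    if j = phrase.length then goB phrase fuel ((w :: ws).drop j) (count + 1)
    else goB phrase fuel ((w :: ws).drop (j + 1)) count

def check_for_phrase_alt (phrase : List String) (transcript : List String) : Int :=
  goB phrase transcript.length (transcript.map PySem.Str.lower) 0

-- ===== PRECONDITION & SPEC =====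
-- Pre_ excludes only the inputs where A raises IndexError: phrase = [] with a nonempty
-- transcript (phrase[0] is evaluated for the first word). B loops forever there.
def Pre_check_for_phrase (phrase : List String) (transcript : List String) : Prop :=
  phrase ≠ [] ∨ transcript = []
instance (phrase : List String) (transcript : List String) : Decidable (Pre_check_for_phrase phrase transcript) := by unfold Pre_check_for_phrase; infer_instance

def pvWitness_check_for_phrase : List String × List String := (["hello"], ["Hello", "hello"])

def Spec_check_for_phrase (phrase : List String) (transcript : List String) (out : Int) : Prop := out = check_for_phrase_alt phrase transcript
instance (phrase : List String) (transcript : List String) (out : Int) : Decidable (Spec_check_for_phrase phrase transcript out) := by unfold Spec_check_for_phrase; infer_instance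

-- ===== CLAIM (what is proved, stated in full; the proofs are below) =====
def Claim_equal_check_for_phrase : Prop := ∀ (phrase : List String) (transcript : List String), Dom_check_for_phrase phrase transcript → Pre_check_for_phrase phrase transcript → Spec_check_for_phrase phrase transcript (check_for_phrase phrase transcript)

-- ===== LEMMAS AND PROOFS =====

-- One A-attempt, summarised: from state ci (< |phrase|), A either completes the phrase
-- (prefix match of length |phrase| - ci), exhausts the transcript, or mismatches and
-- restarts after the mismatching word.
theorem goA_attempt (phrase : List String) :
    ∀ (ws : List String) (ci : Nat) (pp : Bool) (pc : Int), ci < phrase.length →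
    goA phrase ws (pp, phrase.take ci, (ci : Int), pc) =
      (if matchLen (phrase.drop ci) (ws.map PySem.Str.lower) = phrase.length - ci
       then goA phrase (ws.drop (phrase.length - ci)) (false, [], 0, pc + 1)
       else if ws.length ≤ matchLen (phrase.drop ci) (ws.map PySem.Str.lower)
       then pc
       else goA phrase (ws.drop (matchLen (phrase.drop ci) (ws.map PySem.Str.lower) + 1)) (false, [], 0, pc)) := by
  intro ws
  induction ws with
  | nil =>
    intro ci pp pc hci
    have h0 : matchLen (phrase.drop ci) ([] : List String) = 0 := by
      cases phrase.drop ci <;> rfl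
    simp [goA, h0]
    omega
  | cons w rest ih =>
    intro ci pp pc hci
    have hget : PySem.List.pyGet? phrase ((ci : Nat) : Int) = some (phrase[ci]) := by
      simp [PySem.List.pyGet?_natCast, List.getElem?_eq_getElem hci]
    have hdrop : phrase.drop ci = phrase[ci] :: phrase.drop (ci + 1) :=
      List.drop_eq_getElem_cons hci
    have hmatch : matchLen (phrase.drop ci) (PySem.Str.lower w :: rest.map PySem.Str.lower) =
        if PySem.Str.lower w = phrase[ci]
        then matchLen (phrase.drop (ci + 1)) (rest.map PySem.Str.lower) + 1 else 0 := by
      rw [hdrop]; rfl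
    simp only [goA, hget, List.map_cons]
    rw [hmatch]
    by_cases hw : PySem.Str.lower w = phrase[ci]
    · rw [if_pos hw, if_pos hw, hw]
      have htake : phrase.take ci ++ [phrase[ci]] = phrase.take (ci + 1) := by
        rw [List.take_add_one]; simp [hci]
      rw [htake]
      by_cases hend : ci + 1 = phrase.length
      · have hfull : phrase.take (ci + 1) = phrase :=
          List.take_of_length_le (by omega)
        have hd1 : phrase.drop (ci + 1) = [] := List.drop_eq_nil_of_le (by omega)
        have hm0 : matchLen (phrase.drop (ci + 1)) (rest.map PySem.Str.lower) = 0 := by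
          rw [hd1]; rfl
        rw [if_pos hfull, hm0]
        rw [if_pos (show (0 + 1 = phrase.length - ci) by omega)]
        have h1 : phrase.length - ci = 1 := by omega
        rw [h1]
        rfl
      · have hne' : phrase.take (ci + 1) ≠ phrase := by
          intro h
          have := congrArg List.length h
          simp [Nat.min_def] at this
          omega
        rw [if_neg hne']
        have hcast : ((ci : Int) + 1) = (((ci + 1 : Nat)) : Int) := by push_cast; ring
        rw [hcast]
        rw [ih (ci + 1) true pc (by omega)]
        generalize matchLen (phrase.drop (ci + 1)) (rest.map PySem.Str.lower) = k
        have e3 : rest.drop (phrase.length - (ci + 1)) = (w :: rest).drop (phrase.length - ci) := by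
          have h1 : phrase.length - ci = (phrase.length - (ci + 1)) + 1 := by omega
          rw [h1, List.drop_succ_cons]
        have e4 : rest.drop (k + 1) = (w :: rest).drop (k + 1 + 1) := by
          rw [List.drop_succ_cons]
        rw [e3, e4]
        by_cases c1 : k + 1 = phrase.length - ci
        · rw [if_pos c1, if_pos (show k = phrase.length - (ci + 1) by omega)]
        · rw [if_neg c1, if_neg (show ¬ k = phrase.length - (ci + 1) by omega)]
          by_cases c2 : (w :: rest).length ≤ k + 1
          · rw [if_pos c2, if_pos (show rest.length ≤ k by simpa using c2)]
          · rw [if_neg c2, if_neg (show ¬ rest.length ≤ k by simpa using c2)]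
    · rw [if_neg hw, if_neg hw]
      rw [if_neg (show ¬ (0 = phrase.length - ci) by omega)]
      rw [if_neg (show ¬ ((w :: rest).length ≤ 0) by simp)]
      rfl

theorem goB_nil (phrase : List String) (fuel : Nat) (c : Int) :
    goB phrase fuel [] c = c := by
  cases fuel <;> rfl

theorem goA_eq_goB (phrase : List String) (hm : phrase ≠ []) :
    ∀ (fuel : Nat) (ws : List String) (pc : Int), ws.length ≤ fuel →
    goA phrase ws (false, [], 0, pc) = goB phrase fuel (ws.map PySem.Str.lower) pc := by
  have hmpos : 0 < phrase.length := List.length_pos_iff.mpr hm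
  intro fuel
  induction fuel with
  | zero =>
    intro ws pc hlen
    have : ws = [] := List.eq_nil_of_length_eq_zero (by omega)
    subst this
    rfl
  | succ fuel ih =>
    intro ws pc hlen
    cases ws with
    | nil => rfl
    | cons w rest =>
      have hlen' : rest.length + 1 ≤ fuel + 1 := by simpa using hlen
      have hstart : goA phrase (w :: rest) (false, [], 0, pc) =
          goA phrase (w :: rest) (false, phrase.take 0, ((0 : Nat) : Int), pc) := rfl
      have hgoB : goB phrase (fuel + 1) ((w :: rest).map PySem.Str.lower) pc =
          (if matchLen phrase ((w :: rest).map PySem.Str.lower) = phrase.length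
           then goB phrase fuel (((w :: rest).map PySem.Str.lower).drop
                  (matchLen phrase ((w :: rest).map PySem.Str.lower))) (pc + 1)
           else goB phrase fuel (((w :: rest).map PySem.Str.lower).drop
                  (matchLen phrase ((w :: rest).map PySem.Str.lower) + 1)) pc) := by
        rw [List.map_cons]; rfl
      rw [hstart, goA_attempt phrase (w :: rest) 0 false pc hmpos, hgoB]
      simp only [List.drop_zero, Nat.sub_zero]
      generalize matchLen phrase ((w :: rest).map PySem.Str.lower) = j
      by_cases c1 : j = phrase.length
      · rw [if_pos c1, if_pos c1, ← c1]
        rw [← List.map_drop]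
        exact ih ((w :: rest).drop j) (pc + 1) (by simp only [List.length_drop, List.length_cons]; omega)
      · rw [if_neg c1, if_neg c1]
        by_cases c2 : (w :: rest).length ≤ j
        · rw [if_pos c2]
          have hc2 : rest.length + 1 ≤ j := by simpa using c2
          have hnil : ((w :: rest).map PySem.Str.lower).drop (j + 1) = [] :=
            List.drop_eq_nil_of_le (by simp only [List.length_map, List.length_cons]; omega)
          rw [hnil, goB_nil]
        · rw [if_neg c2]
          rw [← List.map_drop]
          exact ih ((w :: rest).drop (j + 1)) pc (by simp only [List.length_drop, List.length_cons]; omega)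

-- ===== VERDICT (by name: the statement is the Claim_ definition above) =====
theorem check_for_phrase_spec : Claim_equal_check_for_phrase := by
  intro phrase transcript _ hpre
  unfold Spec_check_for_phrase check_for_phrase check_for_phrase_alt
  rcases hpre with hne | ht
  · exact goA_eq_goB phrase hne transcript.length transcript 0 le_rfl
  · subst ht; cases phrase <;> rfl
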